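-- pv_equiv track=rewrite | github.com/alexandraback/datacollection | solutions_5636311922769920_0/Python/cdkrot/solve.py | solve
-- ===== SOURCE A (Python) =====
-- def gen(k, lst):
--     res, pw = 0, 1
--     for i in range(len(lst)):
--         res += pw * lst[i]
--         pw *= k
--     return res
--
-- def solve(k, c, s):
--     min_ans = (k // c) + (k % c != 0)
--     if min_ans > s:
--         return "IMPOSSIBLE"
--
--     answers = []
--     p_cur = 0
--     while p_cur != k:
--         lst = []
--         while len(lst) < c and p_cur != k:
--             lst.append(p_cur)
--             p_cur += 1
--         while len(lst) < c:
--             lst.append(0)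
--         answers.append(gen(k, lst) + 1)
--     return " ".join(map(str, answers))
-- ===== SOURCE B (Python) =====
-- def solve(k, c, s):
--     min_ans = (k // c) + (k % c != 0)
--     if min_ans > s:
--         return "IMPOSSIBLE"
--     q, r = divmod(k, c)
--     # zero padding never changes a chunk's value, so only min(c, k) digit
--     # positions matter: one short pass precomputes S = sum(k**i) and
--     # T = sum(i * k**i) for i < min(c, k), plus their length-r truncations
--     m = min(c, k)
--     S = T = S_r = T_r = 0
--     pw = 1
--     for i in range(m):
--         if i == r:
--             S_r, T_r = S, T
--         T += i * pw
--         S += pw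
--         pw *= k
--     if r == m:
--         S_r, T_r = S, T
--     # a full chunk starting at `start` has value start*S + T (closed form)
--     answers = [start * S + T + 1 for start in range(0, q * c, c)]
--     if r:
--         answers.append(q * c * S_r + T_r + 1)
--     return " ".join(map(str, answers))
-- ===== Notes on version B (the rewrite author's own statement) =====
-- stated objective: alternative
-- what changed: Replaced A's per-element walk that materialises every zero-padded chunk list and encodes each with the gen helper by a closed form: one pass of length min(c,k) precomputes the sums S=sum k^i and T=sum i*k^i (and their length-r truncations), after which every full chunk's value is start*S+T and the partial chunk's is q*c*S_r+T_r, so the per-chunk digit lists and the gen encoder disappear.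
import Mathlib
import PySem

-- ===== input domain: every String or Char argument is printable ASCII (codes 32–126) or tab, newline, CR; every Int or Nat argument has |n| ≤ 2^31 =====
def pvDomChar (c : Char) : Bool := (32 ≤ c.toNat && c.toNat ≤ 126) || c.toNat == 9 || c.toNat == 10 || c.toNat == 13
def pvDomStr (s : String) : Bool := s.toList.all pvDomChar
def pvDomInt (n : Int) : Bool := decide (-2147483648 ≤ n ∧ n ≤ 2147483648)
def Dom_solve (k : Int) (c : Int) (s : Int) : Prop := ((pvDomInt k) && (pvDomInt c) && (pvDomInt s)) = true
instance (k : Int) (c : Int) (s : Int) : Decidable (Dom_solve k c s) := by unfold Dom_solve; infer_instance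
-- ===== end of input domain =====

-- B replaces A's per-element walk (build each zero-padded chunk list, encode it with gen)
-- by a closed form: one pass of length min(c,k) precomputes S = Σ k^i and T = Σ i·k^i (and
-- their length-r truncations), then each chunk's value is start*S + T directly;
-- objective: alternative. Return values only, no mutation.

-- ===== PORT A =====
-- helper gen(k, lst): res, pw accumulated left to right over lst
def gen (k : Int) (lst : List Int) : Int :=
  (lst.foldl (fun (st : Int × Int) x => (st.1 + st.2 * x, st.2 * k)) (0, 1)).1

-- inner while: collect p_cur while len(lst) < c and p_cur != k (fuel c.toNat suffices)
def fillChunk (k c : Int) : Nat → List Int → Int → List Int × Int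
  | 0, lst, p => (lst, p)
  | f + 1, lst, p =>
      if (lst.length : Int) < c ∧ p ≠ k then fillChunk k c f (lst ++ [p]) (p + 1)
      else (lst, p)

-- padding while: append 0 while len(lst) < c
def padChunk (c : Int) : Nat → List Int → List Int
  | 0, lst => lst
  | f + 1, lst => if (lst.length : Int) < c then padChunk c f (lst ++ [0]) else lst

-- outer while p_cur != k (fuel k.toNat + 1; enough whenever the Python loop terminates)
def solveLoop (k c : Int) : Nat → Int → List Int → List Int
  | 0, _, acc => acc
  | f + 1, p, acc =>
      if p ≠ k then
        let r := fillChunk k c c.toNat [] p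
        let lst2 := padChunk c c.toNat r.1
        solveLoop k c f r.2 (acc ++ [gen k lst2 + 1])
      else acc

def solve (k : Int) (c : Int) (s : Int) : String :=
  let min_ans := PySem.Int.floordiv k c + (if PySem.Int.mod k c ≠ 0 then 1 else 0)
  if min_ans > s then "IMPOSSIBLE"
  else PySem.Str.join " " ((solveLoop k c (k.toNat + 1) 0 []).map PySem.Int.toStr)

-- ===== PORT B =====
-- loop body of B's single precompute pass; state (S, T, S_r, T_r, pw)
def bStep (k r : Int) (st : Int × Int × Int × Int × Int) (i : Int) :
    Int × Int × Int × Int × Int :=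
  ((st.1 + st.2.2.2.2), (st.2.1 + i * st.2.2.2.2),
   (if i = r then st.1 else st.2.2.1),
   (if i = r then st.2.1 else st.2.2.2.1),
   (st.2.2.2.2 * k))

def solve_alt (k : Int) (c : Int) (s : Int) : String :=
  let min_ans := PySem.Int.floordiv k c + (if PySem.Int.mod k c ≠ 0 then 1 else 0)
  if min_ans > s then "IMPOSSIBLE"
  else
    let q := PySem.Int.floordiv k c
    let r := PySem.Int.mod k c
    let m := min c k
    let st := (PySem.List.pyRange 0 m 1).foldl (bStep k r) (0, 0, 0, 0, 1)
    let sr := if r = m then st.1 else st.2.2.1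
    let tr := if r = m then st.2.1 else st.2.2.2.1
    let full := (PySem.List.pyRange 0 (q * c) c).map
      (fun start => start * st.1 + st.2.1 + 1)
    let answers := if r ≠ 0 then full ++ [q * c * sr + tr + 1] else full
    PySem.Str.join " " (answers.map PySem.Int.toStr)

-- ===== PRECONDITION & SPEC =====
-- Pre_ excludes c = 0 (A raises ZeroDivisionError) and the inputs on which A's outer while
-- loop never terminates (k < 0, or k > 0 with c < 0, whenever the IMPOSSIBLE guard does not
-- fire): A returns no value on any excluded input.
def Pre_solve (k : Int) (c : Int) (s : Int) : Prop :=
  c ≠ 0 ∧ (PySem.Int.floordiv k c + (if PySem.Int.mod k c ≠ 0 then 1 else 0) > s ∨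
           k = 0 ∨ (0 < k ∧ 0 < c))
instance (k : Int) (c : Int) (s : Int) : Decidable (Pre_solve k c s) := by
  unfold Pre_solve; infer_instance

def pvWitness_solve : Int × Int × Int := (7, 3, 5)

def Spec_solve (k : Int) (c : Int) (s : Int) (out : String) : Prop := out = solve_alt k c s
instance (k : Int) (c : Int) (s : Int) (out : String) : Decidable (Spec_solve k c s out) := by
  unfold Spec_solve; infer_instance

-- ===== CLAIM (what is proved, stated in full; the proofs are below) =====
def Claim_equal_solve : Prop :=
  ∀ (k : Int) (c : Int) (s : Int), Dom_solve k c s → Pre_solve k c s →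
    Spec_solve k c s (solve k c s)

-- ===== LEMMAS AND PROOFS =====

-- base-k little-endian value of a digit list (proof-only helper)
def enc (k : Int) : List Int → Int
  | [] => 0
  | x :: xs => x + k * enc k xs

-- the value A appends for the chunk starting at `start` (proof-only characterisation)
def chunkVal (k c start : Int) : Int :=
  enc k (PySem.List.pyRange start (min (start + c) k) 1) + 1

-- Σ_{i<n} k^i and Σ_{i<n} i·k^i (proof-only helpers)
def Sg (k : Int) : Nat → Int
  | 0 => 0
  | n + 1 => Sg k n + k ^ n

def Tg (k : Int) : Nat → Int
  | 0 => 0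
  | n + 1 => Tg k n + n * k ^ n

theorem gen_foldl_enc (k : Int) (lst : List Int) : ∀ (r pw : Int),
    (lst.foldl (fun (st : Int × Int) x => (st.1 + st.2 * x, st.2 * k)) (r, pw)).1
      = r + pw * enc k lst := by
  induction lst with
  | nil => intro r pw; simp [enc]
  | cons x xs ih => intro r pw; simp only [List.foldl_cons, ih, enc]; ring

theorem gen_eq_enc (k : Int) (lst : List Int) : gen k lst = enc k lst := by
  simp [gen, gen_foldl_enc]

theorem gen_append_zero (k : Int) (lst : List Int) : gen k (lst ++ [0]) = gen k lst := by
  simp [gen, List.foldl_append]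

theorem gen_padChunk (k c : Int) : ∀ (f : Nat) (lst : List Int),
    gen k (padChunk c f lst) = gen k lst := by
  intro f
  induction f with
  | zero => intro lst; simp [padChunk]
  | succ f ih =>
      intro lst
      simp only [padChunk]
      split_ifs with h
      · rw [ih, gen_append_zero]
      · rfl

theorem fillChunk_spec (k c : Int) : ∀ (f : Nat) (lst : List Int) (p : Int),
    p ≤ k → (lst.length : Int) ≤ c → (min (c - lst.length) (k - p)).toNat ≤ f →
    fillChunk k c f lst p
      = (lst ++ PySem.List.pyRange p (min (p + (c - lst.length)) k) 1,
         min (p + (c - lst.length)) k) := by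
  intro f
  induction f with
  | zero =>
      intro lst p hpk hlen hf
      have h0 : (lst.length : Int) = c ∨ p = k := by omega
      simp only [fillChunk]
      rcases h0 with h | h
      · rw [h]
        have : min (p + (c - c)) k = p := by omega
        rw [this]
        simp [PySem.List.pyRange_one_eq_nil (le_refl p)]
      · subst h
        have : min (p + (c - (lst.length : Int))) p = p := by omega
        rw [this]
        simp [PySem.List.pyRange_one_eq_nil (le_refl p)]
  | succ f ih =>
      intro lst p hpk hlen hf
      simp only [fillChunk]
      split_ifs with h
      · obtain ⟨hlt, hne⟩ := h
        have hpk' : p < k := lt_of_le_of_ne hpk hne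
        rw [ih (lst ++ [p]) (p + 1) (by omega)
            (by simp; omega)
            (by simp; omega)]
        have hlen' : ((lst ++ [p]).length : Int) = (lst.length : Int) + 1 := by simp
        rw [hlen']
        have hmin : min (p + 1 + (c - ((lst.length : Int) + 1))) k
            = min (p + (c - lst.length)) k := by omega
        rw [hmin]
        have hcons : PySem.List.pyRange p (min (p + (c - (lst.length : Int))) k) 1
            = p :: PySem.List.pyRange (p + 1) (min (p + (c - (lst.length : Int))) k) 1 :=
          PySem.List.pyRange_one_cons (by omega)
        rw [hcons]
        simp
      · have h0 : (lst.length : Int) = c ∨ p = k := by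
          by_cases hl : (lst.length : Int) < c
          · right; by_contra hne; exact h ⟨hl, hne⟩
          · left; omega
        rcases h0 with h1 | h1
        · rw [h1]
          have : min (p + (c - c)) k = p := by omega
          rw [this]
          simp [PySem.List.pyRange_one_eq_nil (le_refl p)]
        · subst h1
          have : min (p + (c - (lst.length : Int))) p = p := by omega
          rw [this]
          simp [PySem.List.pyRange_one_eq_nil (le_refl p)]

-- range(a, b, c) for 0 < c, a < b starts with a
theorem pyRange_pos_cons (a b c : Int) (hc : 0 < c) (hab : a < b) :
    PySem.List.pyRange a b c = a :: PySem.List.pyRange (a + c) b c := by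
  rw [PySem.List.pyRange_of_pos a b hc, PySem.List.pyRange_of_pos (a + c) b hc]
  by_cases h2 : a + c < b
  · simp only [if_pos hab, if_pos h2]
    have hn : ((b - a + c - 1) / c).toNat = ((b - (a + c) + c - 1) / c).toNat + 1 := by
      have he : b - a + c - 1 = (b - (a + c) + c - 1) + 1 * c := by ring
      rw [he, Int.add_mul_ediv_right _ _ (by omega)]
      have hnn : 0 ≤ (b - (a + c) + c - 1) / c := Int.ediv_nonneg (by omega) (by omega)
      omega
    rw [hn, List.range_succ_eq_map]
    simp only [List.map_cons, List.map_map, Int.natCast_zero, mul_zero, add_zero]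
    refine congrArg₂ _ rfl ?_
    apply List.map_congr_left
    intro x _
    simp [Function.comp]
    ring
  · simp only [if_pos hab, if_neg h2]
    have hn : ((b - a + c - 1) / c).toNat = 1 := by
      have he : b - a + c - 1 = (b - a - 1) + 1 * c := by ring
      have h0 : (b - a - 1) / c = Int.ediv (b - a - 1) c := rfl
      have h0' : (b - a - 1) / c = 0 := Int.ediv_eq_zero_of_lt (by omega) (by omega)
      rw [he, Int.add_mul_ediv_right _ _ (by omega), h0']
      rfl
    rw [hn]
    simp

theorem pyRange_pos_nil (a b c : Int) (hc : 0 < c) (hab : b ≤ a) :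
    PySem.List.pyRange a b c = [] := by
  rw [PySem.List.pyRange_of_pos a b hc]
  simp [show ¬ a < b by omega]

theorem solveLoop_eq (k c : Int) (hc : 0 < c) : ∀ (fuel : Nat) (p : Int) (acc : List Int),
    0 ≤ p → p ≤ k → (k - p).toNat < fuel →
    solveLoop k c fuel p acc
      = acc ++ (PySem.List.pyRange p k c).map (chunkVal k c) := by
  intro fuel
  induction fuel with
  | zero => intro p acc _ _ hf; omega
  | succ f ih =>
      intro p acc hp0 hpk hf
      simp only [solveLoop]
      split_ifs with h
      · have hpk' : p < k := lt_of_le_of_ne hpk h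
        rw [fillChunk_spec k c c.toNat [] p hpk
            (by simp only [List.length_nil, Int.natCast_zero]; omega)
            (by simp only [List.length_nil, Int.natCast_zero, sub_zero]; omega)]
        simp only [List.length_nil, Int.natCast_zero, sub_zero, List.nil_append]
        set p' := min (p + c) k with hp'
        have hstep : p + 1 ≤ p' := by omega
        rw [ih p' _ (by omega) (by omega) (by omega)]
        rw [gen_padChunk, gen_eq_enc]
        have hr : PySem.List.pyRange p k c = p :: PySem.List.pyRange p' k c := by
          rw [pyRange_pos_cons p k c hc hpk']
          by_cases hck : p + c < k
          · rw [show p' = p + c by omega]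
          · rw [show p' = k by omega, pyRange_pos_nil (p+c) k c hc (by omega),
                pyRange_pos_nil k k c hc (le_refl k)]
        rw [hr]
        simp only [List.map_cons, List.append_assoc, List.singleton_append]
        rfl
      · have h' : p = k := not_not.mp h
        subst h'
        rw [pyRange_pos_nil p p c hc (le_refl p)]
        simp

-- B's precompute pass computes the partial geometric sums
theorem bFold (k r : Int) : ∀ (n : Nat),
    (PySem.List.pyRange 0 (n : Int) 1).foldl (bStep k r) (0, 0, 0, 0, 1)
      = (Sg k n, Tg k n,
         (if 0 ≤ r ∧ r < (n : Int) then Sg k r.toNat else 0),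
         (if 0 ≤ r ∧ r < (n : Int) then Tg k r.toNat else 0), k ^ n) := by
  intro n
  induction n with
  | zero =>
      rw [PySem.List.pyRange_one_eq_nil (by norm_num)]
      simp only [List.foldl_nil, Sg, Tg, pow_zero]
      split_ifs with h
      · omega
      · rfl
  | succ n ih =>
      have hsr : PySem.List.pyRange 0 ((n : Int) + 1) 1
          = PySem.List.pyRange 0 (n : Int) 1 ++ [(n : Int)] :=
        PySem.List.pyRange_one_succ_right (by positivity)
      rw [show ((n + 1 : Nat) : Int) = (n : Int) + 1 by push_cast; ring, hsr,
          List.foldl_append, ih]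
      simp only [List.foldl_cons, List.foldl_nil, bStep]
      by_cases hnr : (n : Int) = r
      · subst hnr
        have h2 : 0 ≤ (n : Int) ∧ (n : Int) < (n : Int) + 1 := ⟨by positivity, by omega⟩
        have h3 : ¬(0 ≤ (n : Int) ∧ (n : Int) < (n : Int)) := by omega
        simp only [if_pos h2, if_neg h3, Int.toNat_natCast]
        simp [Sg, Tg, pow_succ]
      · have h4 : (0 ≤ r ∧ r < (n : Int) + 1) ↔ (0 ≤ r ∧ r < (n : Int)) := by
          constructor <;> intro h <;> exact ⟨h.1, by omega⟩
        simp only [if_neg hnr, h4]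
        simp [Sg, Tg, pow_succ]

theorem enc_append_single (k x : Int) (xs : List Int) :
    enc k (xs ++ [x]) = enc k xs + x * k ^ xs.length := by
  induction xs with
  | nil => simp [enc]
  | cons y ys ih => simp only [List.cons_append, enc, ih, List.length_cons, pow_succ]; ring

-- closed form of the base-k value of a run of consecutive integers
theorem enc_range (k : Int) : ∀ (m : Nat) (a : Int),
    enc k (PySem.List.pyRange a (a + (m : Int)) 1) = a * Sg k m + Tg k m := by
  intro m
  induction m with
  | zero =>
      intro a
      rw [show a + ((0 : Nat) : Int) = a by push_cast; ring,
          PySem.List.pyRange_one_eq_nil (le_refl a)]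
      simp [enc, Sg, Tg]
  | succ m ih =>
      intro a
      have hsr : PySem.List.pyRange a (a + (m : Int) + 1) 1
          = PySem.List.pyRange a (a + (m : Int)) 1 ++ [a + (m : Int)] :=
        PySem.List.pyRange_one_succ_right (by omega)
      rw [show a + ((m + 1 : Nat) : Int) = a + (m : Int) + 1 by push_cast; ring, hsr,
          enc_append_single, ih, PySem.List.length_pyRange_one,
          show (a + (m : Int) - a) = (m : Int) by ring, Int.toNat_natCast]
      simp only [Sg, Tg]
      ring

-- range(0, q*c, c) lists the multiples of c below q*c
theorem pyRange_mul (c : Int) (hc : 0 < c) (q : Nat) :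
    PySem.List.pyRange 0 ((q : Int) * c) c
      = (List.range q).map (fun (j : Nat) => c * (j : Int)) := by
  rw [PySem.List.pyRange_of_pos _ _ hc]
  rcases Nat.eq_zero_or_pos q with hq | hq
  · subst hq; simp
  · have hlt : (0 : Int) < (q : Int) * c := by positivity
    rw [if_pos hlt]
    have hn : (((q : Int) * c - 0 + c - 1) / c).toNat = q := by
      have he : (q : Int) * c - 0 + c - 1 = (c - 1) + (q : Int) * c := by ring
      rw [he, Int.add_mul_ediv_right _ _ (by omega),
          Int.ediv_eq_zero_of_lt (by omega) (by omega)]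
      omega
    rw [hn]
    apply List.map_congr_left
    intro x _
    ring

theorem solveLoop_zero (k c : Int) (hk : k = 0) (hc : c ≠ 0) :
    solveLoop k c (k.toNat + 1) 0 [] = [] ∧ PySem.List.pyRange 0 k c = [] := by
  subst hk
  constructor
  · simp [solveLoop]
  · rcases lt_or_gt_of_ne hc with h | h
    · rw [PySem.List.pyRange_of_neg _ _ h]; simp
    · exact pyRange_pos_nil 0 0 c h (le_refl 0)

-- B's answers list equals A's chunk-value list, for 0 < c and 0 ≤ k
theorem alt_list_eq (k c : Int) (hc : 0 < c) (hk : 0 ≤ k) :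
    (let q := PySem.Int.floordiv k c
     let r := PySem.Int.mod k c
     let m := min c k
     let st := (PySem.List.pyRange 0 m 1).foldl (bStep k r) (0, 0, 0, 0, 1)
     let sr := if r = m then st.1 else st.2.2.1
     let tr := if r = m then st.2.1 else st.2.2.2.1
     let full := (PySem.List.pyRange 0 (q * c) c).map
       (fun start => start * st.1 + st.2.1 + 1)
     if r ≠ 0 then full ++ [q * c * sr + tr + 1] else full)
      = (PySem.List.pyRange 0 k c).map (chunkVal k c) := by
  set q := PySem.Int.floordiv k c with hqdef
  set r := PySem.Int.mod k c with hrdef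
  have hid : q * c + r = k := PySem.Int.floordiv_mul_add_mod k c
  have hr0 : 0 ≤ r := PySem.Int.mod_nonneg k hc
  have hrc : r < c := PySem.Int.mod_lt k hc
  have hq0 : 0 ≤ q := PySem.Int.floordiv_nonneg hk (le_of_lt hc)
  set cn := c.toNat with hcn
  set rn := r.toNat with hrn
  set qn := q.toNat with hqn
  have hcc : (cn : Int) = c := by omega
  have hrr : (rn : Int) = r := by omega
  have hqq : (qn : Int) = q := by omega
  by_cases hck : c ≤ k
  case neg =>
    -- k < c: a single partial chunk (q = 0, r = k); only min(c,k) = k digits matter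
    have hkc : k < c := not_le.mp hck
    have hm : min c k = k := min_eq_right hkc.le
    have hq : q = 0 := by
      by_contra hq1
      have h1 : (1 : Int) ≤ q := by omega
      have h2 : c ≤ q * c := le_mul_of_one_le_left hc.le h1
      omega
    have hrk : r = k := by rw [hq] at hid; omega
    have hkk : ((k.toNat : Int)) = k := by omega
    have hstk := bFold k r k.toNat
    rw [hkk] at hstk
    simp only [if_neg (show ¬(0 ≤ r ∧ r < k) by omega)] at hstk
    simp only [hm, hstk, if_pos hrk, hq, zero_mul,
               pyRange_pos_nil 0 0 c hc (le_refl 0), List.map_nil]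
    rcases eq_or_lt_of_le hk with hk0 | hkpos
    · rw [if_neg (show ¬ r ≠ 0 by omega), ← hk0,
          pyRange_pos_nil 0 0 c hc (le_refl 0)]
      simp
    · rw [if_pos (show r ≠ 0 by omega),
          pyRange_pos_cons 0 k c hc hkpos,
          pyRange_pos_nil (0 + c) k c hc (by omega),
          List.map_cons, List.map_nil, List.nil_append]
      have h1 := enc_range k k.toNat 0
      rw [show (0 : Int) + ((k.toNat : Int)) = k by omega] at h1
      have hcv : chunkVal k c 0 = Tg k k.toNat + 1 := by
        unfold chunkVal
        rw [show min (0 + c) k = k by omega, h1]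
        ring
      rw [hcv]
      norm_num
  case pos =>
    have hm : min c k = c := min_eq_left hck
    simp only [hm, if_neg (show r ≠ c by omega)]
    -- the precompute pass
    have hst : (PySem.List.pyRange 0 c 1).foldl (bStep k r) (0, 0, 0, 0, 1)
        = (Sg k cn, Tg k cn, Sg k rn, Tg k rn, k ^ cn) := by
      have hcond : 0 ≤ r ∧ r < (cn : Int) := ⟨hr0, by rw [hcc]; exact hrc⟩
      rw [← hcc, bFold k r cn]
      simp only [if_pos hcond]
      rfl
    -- each full chunk's value
    have hfull : ∀ j : Nat, (j : Int) * c + c ≤ k →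
        chunkVal k c (c * (j : Int)) = c * (j : Int) * Sg k cn + Tg k cn + 1 := by
      intro j hj
      unfold chunkVal
      rw [show min (c * (j : Int) + c) k = c * (j : Int) + c by
            rw [min_eq_left]; nlinarith,
          show c * (j : Int) + c = c * (j : Int) + (cn : Int) by rw [hcc],
          enc_range]
    -- the last (partial) chunk's value, when r ≠ 0
    have hlast : r ≠ 0 →
        chunkVal k c (c * (qn : Int)) = q * c * Sg k rn + Tg k rn + 1 := by
      intro hrne
      unfold chunkVal
      rw [hqq, show min (c * q + c) k = k by rw [min_eq_right]; nlinarith,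
          show k = c * q + (rn : Int) by rw [hrr, mul_comm c q]; omega, enc_range,
          show c * q = q * c by ring]
    simp only [hst]
    by_cases hrne : r ≠ 0
    · -- q full chunks then one partial chunk
      have hcount : PySem.List.pyRange 0 k c
          = (List.range (qn + 1)).map (fun (j : Nat) => c * (j : Int)) := by
        have hr1 : (1 : Int) ≤ r := by omega
        have hkpos : (0 : Int) < k := by nlinarith [mul_nonneg hq0 hc.le]
        rw [PySem.List.pyRange_of_pos _ _ hc, if_pos hkpos]
        have hn : ((k - 0 + c - 1) / c).toNat = qn + 1 := by
          have he : k - 0 + c - 1 = (r - 1) + (q + 1) * c := by rw [← hid]; ring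
          rw [he, Int.add_mul_ediv_right _ _ (by omega),
              Int.ediv_eq_zero_of_lt (by omega) (by omega)]
          omega
        rw [hn]
        apply List.map_congr_left; intro x _; ring
      rw [if_pos hrne, hcount, ← hqq, pyRange_mul c hc qn, List.map_map,
          List.range_succ, List.map_append, List.map_append]
      refine congrArg₂ _ ?_ ?_
      · rw [List.map_map]
        apply List.map_congr_left
        intro j hj
        have hj' : j < qn := List.mem_range.mp hj
        have hjq : (j : Int) + 1 ≤ (qn : Int) := by exact_mod_cast Nat.succ_le_of_lt hj'
        have hjk : (j : Int) * c + c ≤ k := by nlinarith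
        have hv := hfull j hjk
        simp only [Function.comp]
        rw [hv]
      · simp only [List.map_cons, List.map_nil]
        rw [hlast hrne, hqq]
    · -- exactly q full chunks
      have hrne' : r = 0 := not_not.mp hrne
      have hk' : k = (qn : Int) * c := by rw [hqq]; omega
      have hrange : PySem.List.pyRange 0 k c
          = (List.range qn).map (fun (j : Nat) => c * (j : Int)) := by
        rw [hk', pyRange_mul c hc qn]
      rw [if_neg (by simp [hrne']), ← hqq, pyRange_mul c hc qn, hrange, List.map_map,
          List.map_map]
      apply List.map_congr_left
      intro j hj
      have hj' : j < qn := List.mem_range.mp hj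
      have hjq : (j : Int) + 1 ≤ (qn : Int) := by exact_mod_cast Nat.succ_le_of_lt hj'
      have hjk : (j : Int) * c + c ≤ k := by nlinarith [hk', hjq, hc]
      have hv := hfull j hjk
      simp only [Function.comp]
      rw [hv]

-- ===== VERDICT (by name: the statement is the Claim_ definition above) =====
theorem solve_spec : Claim_equal_solve := by
  intro k c s _ hpre
  obtain ⟨hc, hcase⟩ := hpre
  unfold Spec_solve solve solve_alt
  by_cases hguard :
      PySem.Int.floordiv k c + (if PySem.Int.mod k c ≠ 0 then 1 else 0) > s
  · simp only [if_pos hguard]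
  · simp only [if_neg hguard]
    rcases hcase with h | h | h
    · exact absurd h hguard
    · -- k = 0: both sides produce the empty join
      obtain ⟨h1, _⟩ := solveLoop_zero k c h hc
      have hq : PySem.Int.floordiv k c = 0 := by subst h; simp [PySem.Int.floordiv]
      have hr : PySem.Int.mod k c = 0 := by subst h; simp [PySem.Int.mod]
      rw [h1]
      simp only [hq, hr, zero_mul, ne_eq, not_true_eq_false, if_false]
      have : PySem.List.pyRange 0 (0 : Int) c = [] := by
        rcases lt_or_gt_of_ne hc with hn | hp
        · rw [PySem.List.pyRange_of_neg _ _ hn]; simp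
        · exact pyRange_pos_nil 0 0 c hp (le_refl 0)
      rw [this]
      rfl
    · -- 0 < k, 0 < c: A's loop = chunk values = B's closed forms
      obtain ⟨hk, hcpos⟩ := h
      rw [solveLoop_eq k c hcpos (k.toNat + 1) 0 [] (le_refl 0) (by omega) (by omega),
          List.nil_append, ← alt_list_eq k c hcpos (le_of_lt hk)]
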